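-- pv_equiv track=rewrite | github.com/isogeny-primes/quadratic-torsion | graphs/results.py | points_to_plot
-- ===== SOURCE A (Python) =====
-- from collections import Counter
--
-- def points_to_plot(d_list):
--     my_d_list = d_list.copy()
--     my_d_list = [abs(x) for x in my_d_list]
--     counts = dict(Counter(my_d_list))
--     my_d_list = [(k,v) for k,v in dict(counts).items()]
--     my_d_list.sort()
--     i = 0
--     output = []
--     for x,f in my_d_list:
--         i += f
--         output.append((x,i))
--         # output.append((x,i / float(x)**(1.0/3.0)))
--     return [(0,0)]+output
-- ===== SOURCE B (Python) =====
-- def points_to_plot(d_list):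
--     vals = sorted(abs(x) for x in d_list)
--     output = [(0, 0)]
--     run = 0
--     n = len(vals)
--     for i, v in enumerate(vals):
--         run += 1
--         if i + 1 == n or vals[i + 1] != v:
--             output.append((v, run))
--     return output
-- ===== Notes on version B (the rewrite author's own statement) =====
-- stated objective: simpler
-- what changed: B drops the Counter/dict entirely: it sorts the absolute values themselves and makes one linear grouping pass with a running count, appending a point whenever the value changes, instead of building a frequency dict, sorting its items and folding the counts.
import Mathlib
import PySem

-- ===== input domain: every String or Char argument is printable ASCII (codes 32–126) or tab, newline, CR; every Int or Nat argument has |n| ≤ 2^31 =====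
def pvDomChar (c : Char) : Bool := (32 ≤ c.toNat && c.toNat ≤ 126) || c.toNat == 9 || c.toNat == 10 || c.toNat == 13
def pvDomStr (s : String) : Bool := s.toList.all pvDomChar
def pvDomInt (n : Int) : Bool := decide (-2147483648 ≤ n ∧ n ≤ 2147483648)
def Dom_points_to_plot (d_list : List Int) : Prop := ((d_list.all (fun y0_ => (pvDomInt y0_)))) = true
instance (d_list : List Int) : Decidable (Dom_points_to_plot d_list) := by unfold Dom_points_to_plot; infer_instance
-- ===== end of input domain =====

-- B replaces A's Counter-then-sort-items pipeline by sorting the absolute values and one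
-- grouping pass with a running count (objective: simpler, no frequency dict).

-- ===== PORT A =====
def points_to_plot (d_list : List Int) : List (Int × Int) :=
  let my1 := d_list                                  -- d_list.copy()
  let my2 := my1.map (fun x => |x|)                  -- [abs(x) for x in my_d_list]
  let counts := PySem.Dict.counter my2               -- dict(Counter(my_d_list))
  let pairs := counts.items                          -- [(k,v) for k,v in dict(counts).items()]
  let sortedPairs := PySem.List.sorted2 pairs (fun p => p.1) (fun p => p.2) false  -- .sort() on tuples
  let res := sortedPairs.foldl
      (fun (st : Int × List (Int × Int)) xf => (st.1 + xf.2, st.2 ++ [(xf.1, st.1 + xf.2)]))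
      ((0 : Int), ([] : List (Int × Int)))           -- i = 0; output = []; for x,f in …
  (0, 0) :: res.2                                    -- [(0,0)] + output

-- ===== PORT B =====
-- the loop body of Source B: run += 1; append (v, run) when at the end or the next value differs
def pvGrp : List Int → Int → List (Int × Int)
  | [], _ => []
  | v :: rest, run =>
    match rest with
    | [] => [(v, run + 1)]
    | w :: _ => if w ≠ v then (v, run + 1) :: pvGrp rest (run + 1) else pvGrp rest (run + 1)

def points_to_plot_alt (d_list : List Int) : List (Int × Int) :=
  let vals := PySem.List.sorted (d_list.map (fun x => |x|)) (fun x => x) false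
  (0, 0) :: pvGrp vals 0

-- ===== PRECONDITION & SPEC =====
def Spec_points_to_plot (d_list : List Int) (out : List (Int × Int)) : Prop := out = points_to_plot_alt d_list
instance (d_list : List Int) (out : List (Int × Int)) : Decidable (Spec_points_to_plot d_list out) := by unfold Spec_points_to_plot; infer_instance

-- ===== CLAIM (what is proved, stated in full; the proofs are below) =====
def Claim_equal_points_to_plot : Prop := ∀ (d_list : List Int), Dom_points_to_plot d_list → Spec_points_to_plot d_list (points_to_plot d_list)

-- ===== LEMMAS AND PROOFS =====

-- group a list into runs of consecutive equal values: (value, run length)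
def pvRows : List Int → List (Int × Int)
  | [] => []
  | v :: t =>
    match pvRows t with
    | [] => [(v, 1)]
    | (w, c) :: r => if w = v then (v, c + 1) :: r else (v, 1) :: (w, c) :: r

-- cumulative-sum pass over the runs, A's loop in accumulator-free form
def pvGo : List (Int × Int) → Int → List (Int × Int)
  | [], _ => []
  | (k, c) :: rs, i => (k, i + c) :: pvGo rs (i + c)

theorem pvRows_cons_eq (v : Int) (t : List Int) (c : Int) (r : List (Int × Int))
    (h : pvRows t = (w, c) :: r) :
    pvRows (v :: t) = if w = v then (v, c + 1) :: r else (v, 1) :: (w, c) :: r := by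
  rw [show pvRows (v :: t) = (match pvRows t with
    | [] => [(v, 1)]
    | (w, c) :: r => if w = v then (v, c + 1) :: r else (v, 1) :: (w, c) :: r) from rfl, h]

theorem pvRows_head (v : Int) (t : List Int) : ∃ c r, pvRows (v :: t) = (v, c) :: r := by
  induction t generalizing v with
  | nil => exact ⟨1, [], rfl⟩
  | cons w t' ih =>
    obtain ⟨c, r, h⟩ := ih w
    rw [pvRows_cons_eq v (w :: t') c r h]
    by_cases hwv : w = v
    · exact ⟨c + 1, r, by simp [hwv]⟩
    · exact ⟨1, (w, c) :: r, by simp [hwv]⟩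

theorem pvRows_pairwise (s : List Int) (hs : s.Pairwise (· ≤ ·)) :
    (pvRows s).Pairwise (fun a b => a.1 < b.1) := by
  induction s with
  | nil => simp [pvRows]
  | cons v t ih =>
    rcases List.pairwise_cons.mp hs with ⟨hv, ht⟩
    cases t with
    | nil => simp [pvRows]
    | cons w t' =>
      obtain ⟨c, r, hr⟩ := pvRows_head w t'
      have ihw := ih ht
      rw [hr] at ihw
      rcases List.pairwise_cons.mp ihw with ⟨hwr, hrp⟩
      rw [pvRows_cons_eq v (w :: t') c r hr]
      by_cases hwv : w = v
      · subst hwv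
        simp only []
        exact List.pairwise_cons.mpr ⟨fun b hb => hwr b hb, hrp⟩
      · have hvw : v < w := lt_of_le_of_ne (hv w (by simp)) (Ne.symm hwv)
        simp only [if_neg hwv]
        refine List.pairwise_cons.mpr ⟨?_, ihw⟩
        intro b hb
        rcases List.mem_cons.mp hb with hb | hb
        · simp [hb, hvw]
        · exact lt_trans hvw (hwr b hb)

theorem pvRows_mem (s : List Int) :
    s.Pairwise (· ≤ ·) → ∀ p : Int × Int, p ∈ pvRows s ↔ p.1 ∈ s ∧ p.2 = (s.count p.1 : Int) := by
  induction s with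
  | nil => intro _ p; simp [pvRows]
  | cons v t ih =>
    intro hs p
    rcases List.pairwise_cons.mp hs with ⟨hv, ht⟩
    have iht := ih ht
    cases t with
    | nil =>
      simp only [pvRows]
      constructor
      · rintro h
        simp only [List.mem_singleton] at h
        subst h
        simp
      · rintro ⟨h1, h2⟩
        simp only [List.mem_singleton] at h1
        obtain ⟨p1, p2⟩ := p
        simp_all
    | cons w t' =>
      obtain ⟨c, r, hr⟩ := pvRows_head w t'
      have hpw := pvRows_pairwise (w :: t') ht
      rw [hr] at hpw
      rcases List.pairwise_cons.mp hpw with ⟨hwr, _⟩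
      rw [pvRows_cons_eq v (w :: t') c r hr]
      by_cases hwv : w = v
      · subst hwv
        have hcount : c = ((w :: t').count w : Int) := by
          have := (iht (w, c)).mp (by rw [hr]; simp)
          simpa using this.2
        simp only []
        constructor
        · intro hm
          rcases List.mem_cons.mp hm with h | h
          · subst h
            refine ⟨by simp, ?_⟩
            rw [show ((w :: w :: t').count w) = ((w :: t').count w) + 1 from
              List.count_cons_self]
            push_cast
            push_cast at hcount
            omega
          · have hmem := (iht p).mp (by rw [hr]; exact List.mem_cons_of_mem _ h)
            have hne : p.1 ≠ w := by
              have := hwr p h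
              omega
            refine ⟨List.mem_cons_of_mem _ hmem.1, ?_⟩
            rw [List.count_cons_of_ne (by exact fun hc => hne hc.symm)]
            exact hmem.2
        · rintro ⟨h1, h2⟩
          by_cases hpv : p.1 = w
          · obtain ⟨p1, p2⟩ := p
            simp only at hpv h2
            subst hpv
            rw [show ((p1 :: p1 :: t').count p1) = ((p1 :: t').count p1) + 1 from
              List.count_cons_self] at h2
            push_cast at h2 hcount
            have hp2 : p2 = c + 1 := by omega
            simp [hp2]
          · have h1' : p.1 ∈ w :: t' := by
              rcases List.mem_cons.mp h1 with h1 | h1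
              · exact absurd h1 hpv
              · exact h1
            have h2' : p.2 = ((w :: t').count p.1 : Int) := by
              rw [List.count_cons_of_ne (by exact fun hc => hpv hc.symm)] at h2
              exact h2
            have hmem := (iht p).mpr ⟨h1', h2'⟩
            rw [hr] at hmem
            rcases List.mem_cons.mp hmem with h | h
            · exact absurd (by rw [h]) hpv
            · exact List.mem_cons_of_mem _ h
      · have hvnot : v ∉ w :: t' := by
          intro hvm
          rcases List.mem_cons.mp hvm with h | h
          · exact hwv h.symm
          · have h1 : w ≤ v := (List.pairwise_cons.mp ht).1 v h
            have h2 : v ≤ w := hv w (by simp)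
            exact hwv (le_antisymm h1 h2)
        simp only [if_neg hwv]
        constructor
        · intro hm
          rcases List.mem_cons.mp hm with h | h
          · subst h
            refine ⟨by simp, ?_⟩
            rw [show ((v :: w :: t').count v) = ((w :: t').count v) + 1 from
              List.count_cons_self, List.count_eq_zero_of_not_mem hvnot]
            simp
          · have hmem := (iht p).mp (by rw [hr]; exact h)
            have hne : p.1 ≠ v := fun hc => hvnot (hc ▸ hmem.1)
            refine ⟨List.mem_cons_of_mem _ hmem.1, ?_⟩
            rw [List.count_cons_of_ne (by exact fun hc => hne hc.symm)]
            exact hmem.2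
        · rintro ⟨h1, h2⟩
          by_cases hpv : p.1 = v
          · obtain ⟨p1, p2⟩ := p
            simp only at hpv h2
            subst hpv
            rw [show ((p1 :: w :: t').count p1) = ((w :: t').count p1) + 1 from
              List.count_cons_self, List.count_eq_zero_of_not_mem hvnot] at h2
            push_cast at h2
            have hp2 : p2 = 1 := by omega
            simp [hp2]
          · have h1' : p.1 ∈ w :: t' := by
              rcases List.mem_cons.mp h1 with h1 | h1
              · exact absurd h1 hpv
              · exact h1
            have h2' : p.2 = ((w :: t').count p.1 : Int) := by
              rw [List.count_cons_of_ne (by exact fun hc => hpv hc.symm)] at h2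
              exact h2
            have hmem := (iht p).mpr ⟨h1', h2'⟩
            rw [hr] at hmem
            exact List.mem_cons_of_mem _ hmem

theorem pvRows_nodup (s : List Int) (hs : s.Pairwise (· ≤ ·)) : (pvRows s).Nodup :=
  (pvRows_pairwise s hs).imp (fun h => by intro he; rw [he] at h; exact lt_irrefl _ h)

-- insert-sort congruence: two comparison functions agreeing on the processed elements sort alike
theorem pvInsertBy_congr {α : Type} (f g : α → α → Bool) (x : α) (l : List α)
    (h : ∀ y ∈ l, f x y = g x y) :
    PySem.List.insertBy f x l = PySem.List.insertBy g x l := by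
  induction l with
  | nil => rfl
  | cons y ys ih =>
    simp only [PySem.List.insertBy]
    rw [h y (by simp)]
    by_cases hg : g x y = true
    · simp [hg]
    · simp only [hg]
      rw [ih (fun z hz => h z (List.mem_cons_of_mem _ hz))]

theorem pvFoldl_insertBy_congr {α : Type} (f g : α → α → Bool) (zs : List α) :
    ∀ acc : List α,
    (∀ a ∈ zs, ∀ b ∈ acc, f a b = g a b) →
    (∀ a ∈ zs, ∀ b ∈ zs, f a b = g a b) →
    zs.foldl (fun acc x => PySem.List.insertBy f x acc) acc
      = zs.foldl (fun acc x => PySem.List.insertBy g x acc) acc := by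
  induction zs with
  | nil => intro acc _ _; rfl
  | cons hd tl ih =>
    intro acc hacc hzs
    simp only [List.foldl_cons]
    rw [pvInsertBy_congr f g hd acc (fun y hy => hacc hd (by simp) y hy)]
    apply ih
    · intro a ha b hb
      rcases (PySem.List.mem_insertBy g hd b acc).mp hb with hb | hb
      · rw [hb]; exact hzs a (List.mem_cons_of_mem _ ha) hd (by simp)
      · exact hacc a (List.mem_cons_of_mem _ ha) b hb
    · intro a ha b hb
      exact hzs a (List.mem_cons_of_mem _ ha) b (List.mem_cons_of_mem _ hb)

-- A's tuple sort of the counter items equals the run decomposition of the sorted value list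
theorem pvSorted2_counter (m : List Int) :
    PySem.List.sorted2 (PySem.Dict.counter m).items (fun p => p.1) (fun p => p.2) false
      = pvRows (PySem.List.sorted m (fun x => x) false) := by
  set items := (PySem.Dict.counter m).items with hitems
  set s := PySem.List.sorted m (fun x => x) false with hsdef
  have hs : s.Pairwise (· ≤ ·) := PySem.List.sorted_pairwise m (fun x => x)
  have hperm : s.Perm m := PySem.List.sorted_perm m (fun x => x) false
  -- first-component injectivity on items
  have hinj : ∀ a ∈ items, ∀ b ∈ items, a.1 = b.1 → a = b := by
    intro a ha b hb hab
    rw [hitems, PySem.Dict.items_counter] at ha hb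
    obtain ⟨ka, _, hka⟩ := List.mem_map.mp ha
    obtain ⟨kb, _, hkb⟩ := List.mem_map.mp hb
    subst hka; subst hkb
    simp only at hab
    rw [hab]
  -- lex comparison collapses to the first-key comparison on items
  have hcongr : PySem.List.sorted2 items (fun p => p.1) (fun p => p.2) false
      = PySem.List.sorted items (fun p => p.1) false := by
    simp only [PySem.List.sorted2, PySem.List.sorted, if_neg (by decide : ¬ false = true)]
    apply pvFoldl_insertBy_congr
    · intro a _ b hb; exact absurd hb (List.not_mem_nil)
    · intro a ha b hb
      by_cases h1 : a.1 < b.1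
      · simp [h1]
      · by_cases h2 : b.1 < a.1
        · simp [h2]
        · have hab : a = b := hinj a ha b hb (le_antisymm (le_of_not_gt h2) (le_of_not_gt h1))
          subst hab
          simp
  rw [hcongr]
  apply PySem.List.sorted_eq_of_perm_of_pairwise_lt
  · -- pvRows s is a permutation of the counter items
    have hnodup_items : items.Nodup := by
      have hk := PySem.Dict.nodup_keys_counter m
      have : (PySem.Dict.counter m).keys = items.map (·.1) := by
        rw [hitems]; rfl
      rw [this] at hk
      exact hk.of_map _
    rw [List.perm_ext_iff_of_nodup (pvRows_nodup s hs) hnodup_items]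
    intro p
    rw [pvRows_mem s hs p, hitems, PySem.Dict.items_counter]
    constructor
    · rintro ⟨h1, h2⟩
      obtain ⟨p1, p2⟩ := p
      simp only at h1 h2
      refine List.mem_map.mpr ⟨p1, ?_, ?_⟩
      · exact (PySem.Set.mem_ofList m p1).mpr (hperm.mem_iff.mp h1)
      · rw [hperm.count_eq p1] at h2
        rw [← h2]
    · intro h
      obtain ⟨k, hk, hkp⟩ := List.mem_map.mp h
      subst hkp
      refine ⟨hperm.mem_iff.mpr ((PySem.Set.mem_ofList m k).mp hk), ?_⟩
      simp [hperm.count_eq k]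
  · exact pvRows_pairwise s hs

-- A's cumulative loop in closed form
theorem pvFoldl_cum (rs : List (Int × Int)) :
    ∀ (i : Int) (out : List (Int × Int)),
    rs.foldl (fun (st : Int × List (Int × Int)) xf => (st.1 + xf.2, st.2 ++ [(xf.1, st.1 + xf.2)])) (i, out)
      = (i + (rs.map (·.2)).sum, out ++ pvGo rs i) := by
  induction rs with
  | nil => intro i out; simp [pvGo]
  | cons p rs ih =>
    intro i out
    obtain ⟨k, c⟩ := p
    simp only [List.foldl_cons, ih, pvGo, List.map_cons, List.sum_cons]
    rw [Prod.mk.injEq]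
    constructor
    · ring
    · simp

-- B's grouping pass equals the cumulative pass over the run decomposition
theorem pvGrp_eq_go (s : List Int) : ∀ run : Int, pvGrp s run = pvGo (pvRows s) run := by
  induction s with
  | nil => intro run; rfl
  | cons v t ih =>
    intro run
    cases t with
    | nil => simp [pvGrp, pvRows, pvGo]
    | cons w t' =>
      obtain ⟨c, r, hr⟩ := pvRows_head w t'
      rw [pvRows_cons_eq v (w :: t') c r hr]
      rw [show pvGrp (v :: w :: t') run
        = if w ≠ v then (v, run + 1) :: pvGrp (w :: t') (run + 1) else pvGrp (w :: t') (run + 1) from rfl]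
      by_cases hwv : w = v
      · subst hwv
        rw [if_neg (show ¬ w ≠ w by simp), if_pos rfl, ih (run + 1), hr]
        simp only [pvGo]
        rw [show run + 1 + c = run + (c + 1) from by ring]
      · rw [if_pos hwv, if_neg hwv, ih (run + 1), hr]
        simp only [pvGo]

-- ===== VERDICT (by name: the statement is the Claim_ definition above) =====
theorem points_to_plot_spec : Claim_equal_points_to_plot := by
  intro d_list _
  unfold Spec_points_to_plot points_to_plot points_to_plot_alt
  simp only
  rw [pvSorted2_counter (d_list.map (fun x => |x|)), pvFoldl_cum, pvGrp_eq_go]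
  simp
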